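-- pv_equiv track=rewrite | github.com/marifaceless/edge-bulk-tts | edge_bulk.py | group_voices_by_locale
-- ===== SOURCE A (Python) =====
-- from typing import Dict, List
--
-- def group_voices_by_locale(voices: List[Dict]) -> Dict[str, List[Dict]]:
--     """Group voices by locale/language."""
--     grouped: Dict[str, List[Dict]] = {}
--     for voice in voices:
--         locale = voice["Locale"]
--         if locale not in grouped:
--             grouped[locale] = []
--         grouped[locale].append(voice)
--     return grouped
-- ===== SOURCE B (Python) =====
-- from typing import Dict, List
--
-- def group_voices_by_locale(voices: List[Dict]) -> Dict[str, List[Dict]]: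
--     """Group voices by locale/language."""
--     order = list(dict.fromkeys(v["Locale"] for v in voices))
--     return {loc: [v for v in voices if v["Locale"] == loc] for loc in order}
-- ===== Notes on version B (the rewrite author's own statement) =====
-- stated objective: alternative
-- what changed: Replaces the single hash-bucketing pass that mutates per-key lists with a two-phase plan: first compute the ordered list of distinct locales (dict.fromkeys), then build each group by one filtering comprehension over the input.
import Mathlib
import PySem

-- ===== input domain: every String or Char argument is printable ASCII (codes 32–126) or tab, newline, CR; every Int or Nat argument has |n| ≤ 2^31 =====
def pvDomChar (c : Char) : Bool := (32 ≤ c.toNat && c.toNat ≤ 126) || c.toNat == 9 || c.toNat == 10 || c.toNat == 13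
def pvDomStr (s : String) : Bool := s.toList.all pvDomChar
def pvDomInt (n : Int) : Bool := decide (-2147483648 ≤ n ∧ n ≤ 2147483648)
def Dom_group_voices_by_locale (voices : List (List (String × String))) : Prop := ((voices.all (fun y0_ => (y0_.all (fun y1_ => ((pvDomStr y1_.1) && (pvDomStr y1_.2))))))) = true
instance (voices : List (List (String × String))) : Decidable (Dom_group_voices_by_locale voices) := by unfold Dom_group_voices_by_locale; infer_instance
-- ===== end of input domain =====

-- B groups by locale in two phases (ordered distinct locales, then one filter per locale) instead of A's single bucketing pass into a dict of mutated lists; return values agree, Pre_ excludes voices lacking a "Locale" key (KeyError in both).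


-- ===== PORT A =====
-- voice["Locale"]: dict lookup; under Pre_ the key is present, so the "" default is never used
def locKey (v : List (String × String)) : String :=
  (PySem.Dict.ofList v).getD "Locale" ""

def group_voices_by_locale (voices : List (List (String × String))) : List (String × List (List (String × String))) :=
  (voices.foldl (fun g v =>
      let locale := locKey v
      let g' := if g.contains locale then g
                else g.insert locale ([] : List (List (String × String)))
      g'.modify locale [] (fun l => l ++ [v]))
    PySem.Dict.empty).items

-- ===== PORT B =====
def group_voices_by_locale_alt (voices : List (List (String × String))) : List (String × List (List (String × String))) :=
  ((PySem.List.dedup (voices.map locKey)).foldl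
      (fun d loc => d.insert loc (voices.filter (fun v => locKey v == loc)))
      PySem.Dict.empty).items

-- ===== PRECONDITION & SPEC =====
-- Pre_ excludes voices without a "Locale" key: there Python A (and B) raise KeyError.
def Pre_group_voices_by_locale (voices : List (List (String × String))) : Prop :=
  (voices.all (fun v => v.any (fun p => p.1 == "Locale"))) = true
instance (voices : List (List (String × String))) : Decidable (Pre_group_voices_by_locale voices) := by unfold Pre_group_voices_by_locale; infer_instance
def pvWitness_group_voices_by_locale : (List (List (String × String))) :=
  [[("Locale", "en-US"), ("Name", "Aria")], [("Locale", "fr-FR")], [("Locale", "en-US"), ("Name", "Guy")]]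

def Spec_group_voices_by_locale (voices : List (List (String × String))) (out : List (String × List (List (String × String)))) : Prop := out = group_voices_by_locale_alt voices
instance (voices : List (List (String × String))) (out : List (String × List (List (String × String)))) : Decidable (Spec_group_voices_by_locale voices out) := by unfold Spec_group_voices_by_locale; infer_instance

-- ===== CLAIM (what is proved, stated in full; the proofs are below) =====
def Claim_equal_group_voices_by_locale : Prop := ∀ (voices : List (List (String × String))), Dom_group_voices_by_locale voices → Pre_group_voices_by_locale voices → Spec_group_voices_by_locale voices (group_voices_by_locale voices)

-- ===== LEMMAS AND PROOFS =====

-- A's "if absent insert []" step followed by the append-modify is one modify with default []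
theorem modify_insert_fresh {ν : Type} (g : PySem.Dict String ν) (k : String) (d0 : ν) (f : ν → ν)
    (h : g.contains k = false) : (g.insert k d0).modify k d0 f = g.modify k d0 f := by
  have hg : ({ items := g.items ++ [(k, d0)] } : PySem.Dict String ν) = g.insert k d0 := by
    rw [PySem.Dict.ext_iff, PySem.Dict.items_insert_of_not_contains (h := h)]
  have hmem : ∀ p ∈ g.items, p.1 ≠ k := by
    intro p hp
    simp only [PySem.Dict.contains, List.any_eq_false, beq_iff_eq] at h
    exact h p hp
  simp only [PySem.Dict.modify, PySem.Dict.insert, h, Bool.false_eq_true, ↓reduceIte,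
    PySem.Dict.contains_mk, List.any_append, List.any_cons, BEq.rfl, List.any_nil, Bool.or_false,
    Bool.or_true, beq_iff_eq, List.map_append, List.map_cons, List.map_nil, PySem.Dict.mk.injEq,
    List.append_singleton_inj, Prod.mk.injEq, true_and]
  constructor
  · conv_rhs => rw [← List.map_id g.items]
    apply List.map_congr_left
    intro p hp; simp [hmem p hp]
  · rw [hg, PySem.Dict.getD_insert_self, PySem.Dict.getD_of_not_contains (h := h)]

theorem stepA_eq (g : PySem.Dict String (List (List (String × String)))) (v : List (String × String)) :
    (let locale := locKey v
     let g' := if g.contains locale then g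
               else g.insert locale ([] : List (List (String × String)))
     g'.modify locale [] (fun l => l ++ [v]))
    = g.modify (locKey v) [] (fun l => l ++ [v]) := by
  by_cases h : g.contains (locKey v) = true
  · simp [h]
  · simp only [Bool.not_eq_true] at h
    simp only [h, Bool.false_eq_true, ↓reduceIte]
    exact modify_insert_fresh _ _ _ _ h

theorem groupA_eq_modify_fold (voices : List (List (String × String))) :
    group_voices_by_locale voices
    = ((voices.map (fun v => (locKey v, v))).foldl
        (fun d p => d.modify p.1 [] (fun l => l ++ [p.2])) PySem.Dict.empty).items := by
  unfold group_voices_by_locale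
  rw [List.foldl_map]
  congr 2
  funext g v
  exact stepA_eq g v

theorem group_voices_by_locale_spec : Claim_equal_group_voices_by_locale := by
  intro voices _ _
  unfold Spec_group_voices_by_locale
  rw [groupA_eq_modify_fold]
  set l := voices.map (fun v => (locKey v, v)) with hl
  set d := l.foldl (fun d p => d.modify p.1 [] (fun s => s ++ [p.2])) PySem.Dict.empty with hd
  have hnd : d.keys.Nodup := by
    rw [hd]
    exact PySem.Dict.nodup_keys_foldl_modify_key l Prod.fst []
      (fun d p => (fun s => s ++ [p.2])) PySem.Dict.empty PySem.Dict.nodup_keys_empty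
  have hkeys : d.keys = PySem.List.dedup (voices.map locKey) := by
    rw [hd, PySem.Dict.keys_foldl_modify_key]
    simp [hl, List.map_map, PySem.Set.update_nil_left, Function.comp_def]
  have hget : ∀ k, d.getD k [] = voices.filter (fun v => locKey v == k) := by
    intro k
    rw [hd, PySem.Dict.getD_foldl_modify_append, hl]
    simp [List.filter_map, List.map_map, Function.comp_def]
  have hB : group_voices_by_locale_alt voices
      = (PySem.List.dedup (voices.map locKey)).map
          (fun k => (k, voices.filter (fun v => locKey v == k))) := by
    unfold group_voices_by_locale_alt
    rw [PySem.Dict.items_foldl_insert_fresh (k := fun a => a)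
      (v := fun a => voices.filter (fun w => locKey w == a))]
    · simp [PySem.Dict.empty]
    · intro a _; exact PySem.Dict.contains_empty a
    · simp [PySem.List.dedup_eq_ofList, PySem.Set.nodup_ofList]
  rw [hB, PySem.Dict.items_eq_map_keys d hnd [], hkeys]
  exact List.map_congr_left (fun k _ => by rw [hget k])
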